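-- pv_equiv track=rewrite | github.com/nkrishnan244/convert_phone_number | helper_functions.py | include_dashes
-- ===== SOURCE A (Python) =====
-- def include_dashes(dashless_phone_number):
--     """
--     Adds proper dashes to phone numbers
--
--     Parameters:
--     dashless_phone_number (String): string that represents phone number (without dashes)
--
--     Returns:
--     String: string representation of phone number (with dashes)
--
--     """
--     phone_number = ""
--     for i in range(len(dashless_phone_number) - 1, -1, -1):
--         phone_number = dashless_phone_number[i] + phone_number
--         if not i == 0:  # Prevents dash from being added at front of number
--             index_from_back = len(dashless_phone_number) - i
--             # Only add dash after last 4 elements, or every last 3 elements after that (4, 7, 10, etc)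
--             if index_from_back == 4 or (index_from_back > 4 and (index_from_back - 4) % 3 == 0):
--                 phone_number = "-" + phone_number
--     return phone_number
-- ===== SOURCE B (Python) =====
-- def include_dashes(dashless_phone_number):
--     """Reverse the number, chunk it into a 4-group then 3-groups by slicing,
--     join the non-empty groups with dashes and reverse back."""
--     reversed_number = dashless_phone_number[::-1]
--     groups = [reversed_number[:4]]
--     rest = reversed_number[4:]
--     while rest:
--         groups.append(rest[:3])
--         rest = rest[3:]
--     return "-".join(g for g in groups if g)[::-1]
-- ===== Notes on version B (the rewrite author's own statement) =====
-- stated objective: simpler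
-- what changed: Replaces the per-character backwards loop that rebuilds the string by prepending on every iteration with one reverse, slice-based chunking (a 4-chunk then 3-chunks), a single join with dashes, and a final reverse.
import Mathlib
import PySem

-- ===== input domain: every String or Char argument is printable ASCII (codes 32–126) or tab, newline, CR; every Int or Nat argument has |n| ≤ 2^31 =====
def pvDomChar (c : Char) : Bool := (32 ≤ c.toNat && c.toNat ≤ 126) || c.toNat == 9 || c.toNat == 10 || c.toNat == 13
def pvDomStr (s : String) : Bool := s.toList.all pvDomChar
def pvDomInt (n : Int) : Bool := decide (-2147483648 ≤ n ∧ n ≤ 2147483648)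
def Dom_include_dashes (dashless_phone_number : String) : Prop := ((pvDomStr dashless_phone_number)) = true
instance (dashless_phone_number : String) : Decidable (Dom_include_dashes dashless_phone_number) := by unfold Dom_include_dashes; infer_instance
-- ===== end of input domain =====

-- B re-implements the dash insertion by reverse + slice chunking (4 then 3s) + join instead of
-- A's per-character backwards loop with modular dash placement; same return value, objective: simpler.

-- ===== PORT A =====
-- one loop iteration of A: prepend dashless[i], then maybe a dash (strings modelled as List Char; exact)
def dashStep (cs : List Char) (n : Int) (phone : List Char) (i : Int) : List Char :=
  let phone := PySem.List.pyGetD cs i ' ' :: phone   -- dashless_phone_number[i]; i is always in range here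
  if i ≠ 0 then
    if n - i = 4 ∨ (n - i > 4 ∧ PySem.Int.mod (n - i - 4) 3 = 0) then '-' :: phone else phone
  else phone

def include_dashes (dashless_phone_number : String) : String :=
  let cs := dashless_phone_number.toList
  let n : Int := cs.length
  String.ofList ((PySem.List.pyRange (n - 1) (-1) (-1)).foldl (dashStep cs n) [])

-- ===== PORT B =====
-- the while-loop of B: successive 3-character slices of rest until it is empty
def chunk3 (l : List Char) : List (List Char) :=
  if h : l = [] then [] else l.take 3 :: chunk3 (l.drop 3)
termination_by l.length
decreasing_by
  have : l.length ≠ 0 := fun hl => h (List.eq_nil_of_length_eq_zero hl)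
  simp only [List.length_drop]; omega

def include_dashes_alt (dashless_phone_number : String) : String :=
  let r := dashless_phone_number.toList.reverse              -- s[::-1] (PySem.Str.slice?_none_none_neg_one)
  let groups := r.take 4 :: chunk3 (r.drop 4)                -- r[:4], then 3-slices of r[4:]
  String.ofList (PySem.Chars.join ['-'] (groups.filter (fun g => !g.isEmpty))).reverse

-- ===== PRECONDITION & SPEC =====
def Spec_include_dashes (dashless_phone_number : String) (out : String) : Prop := out = include_dashes_alt dashless_phone_number
instance (dashless_phone_number : String) (out : String) : Decidable (Spec_include_dashes dashless_phone_number out) := by unfold Spec_include_dashes; infer_instance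

-- ===== CLAIM (what is proved, stated in full; the proofs are below) =====
def Claim_equal_include_dashes : Prop := ∀ (dashless_phone_number : String), Dom_include_dashes dashless_phone_number → Spec_include_dashes dashless_phone_number (include_dashes dashless_phone_number)

-- ===== LEMMAS AND PROOFS =====

-- does a dash go right after the m-th character from the back?
def dashAt (m : Nat) : Bool := m == 4 || (4 < m && (m - 4) % 3 == 0)

-- canonical reversed rendering: the reversed input with dashes inserted, k = characters already consumed
def canon : List Char → Nat → List Char
  | [], _ => []
  | c :: t, k => c :: (if t.isEmpty then [] else
      (if dashAt (k + 1) then '-' :: canon t (k + 1) else canon t (k + 1)))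

lemma canon_nil (k : Nat) : canon [] k = [] := rfl

lemma canon_cons (c : Char) (t : List Char) (k : Nat) (h : t ≠ []) :
    canon (c :: t) k = c :: (if dashAt (k + 1) then '-' :: canon t (k + 1) else canon t (k + 1)) := by
  have : t.isEmpty = false := by simpa using h
  simp [canon, this]

lemma chunk3_nil : chunk3 [] = [] := by rw [chunk3]; simp

lemma chunk3_cons (l : List Char) (h : l ≠ []) :
    chunk3 l = l.take 3 :: chunk3 (l.drop 3) := by
  rw [chunk3]; simp [h]

lemma dashAt_false {m : Nat} (h : m ≠ 4 ∧ (m < 4 ∨ (m - 4) % 3 ≠ 0)) : dashAt m = false := by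
  simp [dashAt]; omega

lemma dashAt_true {m : Nat} (h : m = 4 ∨ (4 < m ∧ (m - 4) % 3 = 0)) : dashAt m = true := by
  simp [dashAt]; omega

-- A's Int-arithmetic dash condition is dashAt
lemma dash_cond_iff (k : Nat) :
    ((k : Int) = 4 ∨ ((k : Int) > 4 ∧ PySem.Int.mod ((k : Int) - 4) 3 = 0)) ↔ dashAt k = true := by
  rcases Nat.lt_or_ge 4 k with h | h
  · rw [show ((k : Int) - 4) = ((k - 4 : Nat) : Int) by omega,
      show (3 : Int) = ((3 : Nat) : Int) by norm_num, PySem.Int.mod_natCast]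
    simp [dashAt]; omega
  · constructor
    · rintro (h4 | ⟨hgt, _⟩)
      · exact dashAt_true (Or.inl (by omega))
      · omega
    · intro hd
      simp [dashAt] at hd
      omega

-- A's loop, run from index (n-1-q) down to 0, renders the last (n-q) characters
lemma loopA_eq_canon (cs : List Char) :
    ∀ (fuel q : Nat) (acc : List Char), cs.length - q = fuel → q ≤ cs.length →
      (PySem.List.pyRange ((cs.length : Int) - 1 - q) (-1) (-1)).foldl (dashStep cs cs.length) acc
        = (canon (cs.reverse.drop q) q).reverse ++ acc := by
  intro fuel
  induction fuel with
  | zero =>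
    intro q acc hf hq
    have hq' : q = cs.length := by omega
    subst hq'
    have hdrop : cs.reverse.drop cs.length = [] := List.drop_eq_nil_of_le (by simp)
    rw [PySem.List.pyRange_neg_one_eq_nil (by omega), hdrop, canon_nil]
    simp
  | succ fuel ih =>
    intro q acc hf hq
    have hqlt : q < cs.length := by omega
    rw [PySem.List.pyRange_neg_one_cons (by omega)]
    rw [List.foldl_cons]
    rw [show (cs.length : Int) - 1 - q - 1 = (cs.length : Int) - 1 - (q + 1 : Nat) by push_cast; ring]
    rw [ih (q + 1) _ (by omega) (by omega)]
    -- identify the character processed in this iteration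
    have hqr : q < cs.reverse.length := by simpa using hqlt
    have hdrop : cs.reverse.drop q = cs.reverse[q] :: cs.reverse.drop (q + 1) :=
      List.drop_eq_getElem_cons hqr
    have hchar : PySem.List.pyGetD cs ((cs.length : Int) - 1 - q) ' ' = cs.reverse[q] := by
      rw [PySem.List.pyGetD_eq_getElem cs ' ' (by omega) (by omega), List.getElem_reverse]
      congr 1
      omega
    rw [hdrop]
    by_cases hlast : q + 1 = cs.length
    · -- last iteration: i = 0, no dash
      have hnil : cs.reverse.drop (q + 1) = [] := List.drop_eq_nil_of_le (by simp; omega)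
      simp only [dashStep]
      rw [hchar, if_neg (show ¬((cs.length : Int) - 1 - q ≠ 0) by omega)]
      rw [hnil, canon_nil]
      simp [canon]
    · -- i ≠ 0: maybe a dash, matching dashAt (q+1)
      have hne : cs.reverse.drop (q + 1) ≠ [] := by
        simp [List.drop_eq_nil_iff]; omega
      have hi : (cs.length : Int) - 1 - q ≠ 0 := by omega
      have hsub : (cs.length : Int) - ((cs.length : Int) - 1 - q) = ((q + 1 : Nat) : Int) := by
        push_cast; ring
      simp only [dashStep]
      rw [hchar, if_pos hi, hsub]
      rw [canon_cons _ _ _ hne]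
      by_cases hd : dashAt (q + 1) = true
      · rw [if_pos ((dash_cond_iff (q + 1)).mpr hd), if_pos hd]
        simp
      · rw [if_neg (fun hc => hd ((dash_cond_iff (q + 1)).mp hc)),
          if_neg (fun hc => hd hc)]
        simp

-- chunk3 produces only non-empty groups
lemma mem_chunk3_ne_nil : ∀ (fuel : Nat) (l : List Char), l.length ≤ fuel →
    ∀ g ∈ chunk3 l, g ≠ [] := by
  intro fuel
  induction fuel with
  | zero =>
    intro l hf g hg
    have : l = [] := by cases l <;> simp_all
    rw [this, chunk3_nil] at hg
    simp at hg
  | succ fuel ih =>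
    intro l hf g hg
    by_cases hne : l = []
    · rw [hne, chunk3_nil] at hg; simp at hg
    · rw [chunk3_cons l hne] at hg
      rcases List.mem_cons.mp hg with h | h
      · subst h
        simpa [List.take_eq_nil_iff] using hne
      · have hlen : l.length ≠ 0 := fun h0 => hne (List.eq_nil_of_length_eq_zero h0)
        exact ih (l.drop 3) (by simp only [List.length_drop]; omega) g h

lemma filter_chunk3 (l : List Char) :
    (chunk3 l).filter (fun g => !g.isEmpty) = chunk3 l := by
  rw [List.filter_eq_self]
  intro g hg
  simpa using mem_chunk3_ne_nil l.length l le_rfl g hg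

-- canon inserts no dash when no boundary falls strictly inside the block
lemma canon_no_dash : ∀ (l : List Char) (k : Nat),
    (∀ i, 0 < i → i < l.length → dashAt (k + i) = false) → canon l k = l := by
  intro l
  induction l with
  | nil => intro k _; rfl
  | cons c t ih =>
    intro k h
    rcases t with _ | ⟨c', t'⟩
    · simp [canon]
    · have h1 : dashAt (k + 1) = false := h 1 (by omega) (by simp)
      rw [canon_cons _ _ _ (by simp), h1]
      simp only [Bool.false_eq_true, if_false]
      rw [ih (k + 1) (fun i hi hlen => by
        have := h (i + 1) (by omega) (by simp at hlen ⊢; omega)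
        rwa [show k + 1 + i = k + (i + 1) by omega])]

-- joining the 3-chunks of l equals canon at any chunk-boundary position k (k ≥ 4, 3 ∣ k - 4)
lemma join_chunk3_eq_canon : ∀ (fuel : Nat) (l : List Char) (k : Nat), l.length ≤ fuel →
    l ≠ [] → 4 ≤ k → (k - 4) % 3 = 0 →
    PySem.Chars.join ['-'] (chunk3 l) = canon l k := by
  intro fuel
  induction fuel with
  | zero =>
    intro l k hf hne _ _
    cases l
    · exact absurd rfl hne
    · simp at hf
  | succ fuel ih =>
    intro l k hf hne hk4 hk3
    rw [chunk3_cons l hne]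
    by_cases hlen : l.length ≤ 3
    · have hdrop : l.drop 3 = [] := List.drop_eq_nil_of_le hlen
      rw [hdrop, chunk3_nil, List.take_of_length_le hlen, PySem.Chars.join_singleton]
      rw [canon_no_dash l k (fun i hi hil => dashAt_false (by omega))]
    · -- l has at least 4 characters: peel the first 3 and a dash
      rcases l with _ | ⟨a, l⟩; · exact absurd rfl hne
      rcases l with _ | ⟨b, l⟩; · simp at hlen
      rcases l with _ | ⟨c, l⟩; · simp at hlen
      have hlne : l ≠ [] := by intro h; rw [h] at hlen; simp at hlen
      simp only [List.take_succ_cons, List.take_zero, List.drop_succ_cons, List.drop_zero]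
      rw [chunk3_cons l hlne, PySem.Chars.join_cons_cons, ← chunk3_cons l hlne]
      rw [ih l (k + 3) (by simp at hf; omega) hlne (by omega) (by omega)]
      have h1 : dashAt (k + 1) = false := dashAt_false (by omega)
      have h2 : dashAt (k + 1 + 1) = false := dashAt_false (by omega)
      have h3 : dashAt (k + 1 + 1 + 1) = true := dashAt_true (by omega)
      rw [canon_cons _ _ _ (by simp), canon_cons _ _ _ (by simp), canon_cons _ _ _ hlne,
        h1, h2, h3]
      simp [show k + 1 + 1 + 1 = k + 3 by omega]

-- the whole of B's join equals canon from position 0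
lemma join_groups_eq_canon (r : List Char) (hne : r ≠ []) :
    PySem.Chars.join ['-'] ((r.take 4 :: chunk3 (r.drop 4)).filter (fun g => !g.isEmpty))
      = canon r 0 := by
  have htne : r.take 4 ≠ [] := by simpa [List.take_eq_nil_iff] using hne
  rw [List.filter_cons_of_pos (by simpa using htne), filter_chunk3]
  by_cases hlen : r.length ≤ 4
  · rw [List.drop_eq_nil_of_le hlen, chunk3_nil, List.take_of_length_le hlen,
      PySem.Chars.join_singleton]
    rw [canon_no_dash r 0 (fun i hi hil => dashAt_false (by omega))]
  · -- r has at least 5 characters: peel the first 4 and a dash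
    rcases r with _ | ⟨a, r⟩; · exact absurd rfl hne
    rcases r with _ | ⟨b, r⟩; · simp at hlen
    rcases r with _ | ⟨c, r⟩; · simp at hlen
    rcases r with _ | ⟨d, r⟩; · simp at hlen
    have hrne : r ≠ [] := by intro h; rw [h] at hlen; simp at hlen
    simp only [List.take_succ_cons, List.take_zero, List.drop_succ_cons, List.drop_zero]
    rw [chunk3_cons r hrne, PySem.Chars.join_cons_cons, ← chunk3_cons r hrne]
    rw [join_chunk3_eq_canon r.length r 4 le_rfl hrne (by omega) (by omega)]
    have h1 : dashAt (0 + 1) = false := dashAt_false (by omega)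
    have h2 : dashAt (0 + 1 + 1) = false := dashAt_false (by omega)
    have h3 : dashAt (0 + 1 + 1 + 1) = false := dashAt_false (by omega)
    have h4 : dashAt (0 + 1 + 1 + 1 + 1) = true := dashAt_true (by omega)
    rw [canon_cons _ _ _ (by simp), canon_cons _ _ _ (by simp), canon_cons _ _ _ (by simp),
      canon_cons _ _ _ hrne, h1, h2, h3, h4]
    simp [show (0 : Nat) + 1 + 1 + 1 + 1 = 4 by omega]

-- ===== VERDICT (by name: the statement is the Claim_ definition above) =====
theorem include_dashes_spec : Claim_equal_include_dashes := by
  intro s _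
  unfold Spec_include_dashes include_dashes include_dashes_alt
  dsimp only
  by_cases hcs : s.toList = []
  · rw [hcs]
    rw [PySem.List.pyRange_neg_one_eq_nil (by simp)]
    simp [chunk3_nil, PySem.Chars.join_nil]
  · have hrne : s.toList.reverse ≠ [] := by simpa using hcs
    have hA := loopA_eq_canon s.toList s.toList.length 0 [] (by omega) (by omega)
    simp only [Nat.cast_zero, sub_zero, List.drop_zero, List.append_nil] at hA
    rw [hA, join_groups_eq_canon _ hrne]
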